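-- pv_equiv track=rewrite | github.com/alibrky04/BePaS-Heuristic-Model-for-a-Smart-Parking-System | v3/hybrid_v1/helpers/configurators.py | find_combinations_sorted
-- ===== SOURCE A (Python) =====
-- from enum import Enum
--
-- class Algorithm(Enum):
--     LOCAL_SEARCH = 0
--     BRANCH_AND_BOUND = 1
--     GENETIC = 2
--
-- def find_combinations_sorted(total):
--     combinations = []
--     for local_search in range(total, -1, -1):  # Start from the largest LOCAL_SEARCH
--         for branch_and_bound in range(total - local_search, -1, -1):  # Start from the largest BRANCH_AND_BOUND
--             genetic = total - local_search - branch_and_bound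
--             combinations.append({
--                 Algorithm.LOCAL_SEARCH.name: local_search,
--                 Algorithm.BRANCH_AND_BOUND.name: branch_and_bound,
--                 Algorithm.GENETIC.name: genetic
--             })
--     return combinations
-- ===== SOURCE B (Python) =====
-- from enum import Enum
--
-- class Algorithm(Enum):
--     LOCAL_SEARCH = 0
--     BRANCH_AND_BOUND = 1
--     GENETIC = 2
--
-- def _distribute(names, remaining, acc):
--     if len(names) == 1:
--         return [dict(acc + [(names[0], remaining)])]
--     out = []
--     for v in range(remaining, -1, -1):
--         out.extend(_distribute(names[1:], remaining - v, acc + [(names[0], v)]))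
--     return out
--
-- def find_combinations_sorted(total):
--     return _distribute([a.name for a in Algorithm], total, [])
-- ===== Notes on version B (the rewrite author's own statement) =====
-- stated objective: alternative
-- what changed: Replaced the two hard-coded nested loops building each dict literal by a generic recursive distributor over the list of Algorithm names that threads a partial assignment and extends results per level.
import Mathlib
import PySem

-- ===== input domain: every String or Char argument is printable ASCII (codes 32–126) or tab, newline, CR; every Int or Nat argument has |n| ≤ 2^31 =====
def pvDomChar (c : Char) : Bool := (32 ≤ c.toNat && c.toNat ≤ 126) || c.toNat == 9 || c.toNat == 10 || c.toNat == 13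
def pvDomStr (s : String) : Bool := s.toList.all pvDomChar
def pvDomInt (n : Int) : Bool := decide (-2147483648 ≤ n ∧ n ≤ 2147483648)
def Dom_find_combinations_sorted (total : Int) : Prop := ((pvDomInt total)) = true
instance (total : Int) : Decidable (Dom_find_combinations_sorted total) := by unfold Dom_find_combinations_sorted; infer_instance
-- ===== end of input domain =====

-- B replaces A's two hard-coded nested loops by a generic recursive distributor over the
-- list of Algorithm names (alternative decomposition, same output and cost).
-- Both ports build their Python list with Array.push / Array ++ (Python lists are arrays;
-- same append steps in the same order) and convert to List at the end.


-- ===== PORT A =====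
def find_combinations_sorted (total : Int) : List (List (String × Int)) :=
  ((PySem.List.pyRange total (-1) (-1)).foldl (fun combinations local_search =>
    (PySem.List.pyRange (total - local_search) (-1) (-1)).foldl (fun combinations branch_and_bound =>
      combinations.push [("LOCAL_SEARCH", local_search),
                         ("BRANCH_AND_BOUND", branch_and_bound),
                         ("GENETIC", total - local_search - branch_and_bound)]) combinations)
    (#[] : Array (List (String × Int)))).toList

-- ===== PORT B =====
def pvDistribute (names : List String) (remaining : Int) (acc : List (String × Int)) :
    Array (List (String × Int)) :=
  match names with
  | [] => #[]                      -- unreachable from find_combinations_sorted_alt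
  | [n] => #[acc ++ [(n, remaining)]]
  | n :: rest =>
      (PySem.List.pyRange remaining (-1) (-1)).foldl
        (fun out v => out ++ pvDistribute rest (remaining - v) (acc ++ [(n, v)])) #[]

def find_combinations_sorted_alt (total : Int) : List (List (String × Int)) :=
  (pvDistribute ["LOCAL_SEARCH", "BRANCH_AND_BOUND", "GENETIC"] total []).toList

-- ===== PRECONDITION & SPEC =====
def Spec_find_combinations_sorted (total : Int) (out : List (List (String × Int))) : Prop := out = find_combinations_sorted_alt total
instance (total : Int) (out : List (List (String × Int))) : Decidable (Spec_find_combinations_sorted total out) := by unfold Spec_find_combinations_sorted; infer_instance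

-- ===== CLAIM (what is proved, stated in full; the proofs are below) =====
def Claim_equal_find_combinations_sorted : Prop := ∀ (total : Int), Dom_find_combinations_sorted total → Spec_find_combinations_sorted total (find_combinations_sorted total)

-- ===== LEMMAS AND PROOFS =====
-- folds that push/append into an Array, read back as a List
theorem pv_foldl_push_toList {α β : Type} (l : List α) (f : α → β) (arr : Array β) :
    (l.foldl (fun a x => a.push (f x)) arr).toList = arr.toList ++ l.map f := by
  induction l generalizing arr with
  | nil => simp
  | cons h t ih => simp [List.foldl]

theorem pv_foldl_arrappend_toList {α β : Type} (l : List α) (g : α → Array β) (arr : Array β) :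
    (l.foldl (fun a x => a ++ g x) arr).toList
      = arr.toList ++ l.flatMap (fun x => (g x).toList) := by
  induction l generalizing arr with
  | nil => simp
  | cons h t ih => simp [List.foldl, ih]

-- A as a nested flatMap/map over the two descending ranges (array generalized)
theorem pvA_gen (total : Int) (l : List Int) (arr : Array (List (String × Int))) :
    (l.foldl (fun c ls => (PySem.List.pyRange (total - ls) (-1) (-1)).foldl (fun c bb =>
        c.push [("LOCAL_SEARCH", ls), ("BRANCH_AND_BOUND", bb), ("GENETIC", total - ls - bb)]) c) arr).toList
      = arr.toList ++ l.flatMap (fun ls => (PySem.List.pyRange (total - ls) (-1) (-1)).map (fun bb =>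
          [("LOCAL_SEARCH", ls), ("BRANCH_AND_BOUND", bb), ("GENETIC", total - ls - bb)])) := by
  induction l generalizing arr with
  | nil => simp
  | cons h t ih =>
      rw [List.foldl_cons, ih, pv_foldl_push_toList]
      simp

theorem pvA_flatMap (total : Int) :
    find_combinations_sorted total =
      (PySem.List.pyRange total (-1) (-1)).flatMap (fun ls =>
        (PySem.List.pyRange (total - ls) (-1) (-1)).map (fun bb =>
          [("LOCAL_SEARCH", ls), ("BRANCH_AND_BOUND", bb), ("GENETIC", total - ls - bb)])) := by
  unfold find_combinations_sorted
  rw [pvA_gen]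
  simp

-- B, level by level
theorem pvB_flatMap (total : Int) :
    find_combinations_sorted_alt total =
      (PySem.List.pyRange total (-1) (-1)).flatMap (fun ls =>
        (PySem.List.pyRange (total - ls) (-1) (-1)).map (fun bb =>
          [("LOCAL_SEARCH", ls), ("BRANCH_AND_BOUND", bb), ("GENETIC", total - ls - bb)])) := by
  unfold find_combinations_sorted_alt
  simp [pvDistribute]
  rw [pv_foldl_arrappend_toList]
  simp

-- ===== VERDICT (by name: the statement is the Claim_ definition above) =====
theorem find_combinations_sorted_spec : Claim_equal_find_combinations_sorted := by
  intro total _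
  unfold Spec_find_combinations_sorted
  rw [pvA_flatMap, pvB_flatMap]
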